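-- pv_equiv track=rewrite | github.com/rongothait/sp_final_project_v1 | analysis.py | h_matrix_to_lables
-- ===== SOURCE A (Python) =====
-- def h_matrix_to_lables(h_mat):
--     lables = [-1 for _ in range(len(h_mat))]
--     for i in range(len(h_mat)):
--         max_val = -1
--         max_idx = -1
--         for j in range(len(h_mat[i])):
--             if h_mat[i][j] > max_val:
--                 max_idx = j
--                 max_val = h_mat[i][j]
--         lables[i] = max_idx
--
--     return lables
-- ===== SOURCE B (Python) =====
-- def h_matrix_to_lables(h_mat):
--     labels = []
--     for row in h_mat:
--         m = max(row) if row else -1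
--         labels.append(row.index(m) if m > -1 else -1)
--     return labels
-- ===== Notes on version B (the rewrite author's own statement) =====
-- stated objective: simpler
-- what changed: A's fused single scan tracking a running (max_val, max_idx) pair per row is replaced by a two-pass per-row decomposition: compute m = max(row) (or -1 for an empty row) with the built-in max, then look up its first position with row.index(m), keeping -1 when the maximum is not greater than -1.
import Mathlib
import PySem

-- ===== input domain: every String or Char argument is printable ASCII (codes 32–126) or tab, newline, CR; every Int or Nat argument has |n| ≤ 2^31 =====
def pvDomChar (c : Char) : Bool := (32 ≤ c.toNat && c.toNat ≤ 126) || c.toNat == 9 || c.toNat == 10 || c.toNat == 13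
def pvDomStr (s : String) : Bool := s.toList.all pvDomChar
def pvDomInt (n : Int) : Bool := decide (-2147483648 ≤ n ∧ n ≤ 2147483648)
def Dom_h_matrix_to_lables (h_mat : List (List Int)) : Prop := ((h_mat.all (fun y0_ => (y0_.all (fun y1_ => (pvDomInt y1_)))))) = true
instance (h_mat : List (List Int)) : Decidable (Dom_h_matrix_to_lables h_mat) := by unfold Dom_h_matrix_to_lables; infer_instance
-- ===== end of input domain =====

-- B replaces A's fused running-max/running-index scan by a two-pass per-row decomposition
-- (max(row), then row.index of it); objective: simpler, same O(rows·cols) cost.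

-- ===== PORT A =====
-- inner loop of A: for j in range(len(row)): if row[j] > max_val: max_idx = j; max_val = row[j]
def pvAInner : List Int → Nat → Int × Int → Int × Int
  | [], _, s => s
  | x :: t, j, s => pvAInner t (j + 1) (if x > s.1 then (x, (j : Int)) else s)

def h_matrix_to_lables (h_mat : List (List Int)) : List Int :=
  h_mat.map (fun row => (pvAInner row 0 (-1, -1)).2)

-- ===== PORT B =====
-- m = max(row) if row else -1;  row.index(m) if m > -1 else -1
def pvRowLabel (row : List Int) : Int :=
  let m : Int := match PySem.List.max? row (fun y => y) with
    | none => -1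
    | some m => m
  if m > -1 then (((PySem.List.index? row m).getD 0 : Nat) : Int) else -1

def h_matrix_to_lables_alt (h_mat : List (List Int)) : List Int :=
  h_mat.map pvRowLabel

-- ===== PRECONDITION & SPEC =====
def Spec_h_matrix_to_lables (h_mat : List (List Int)) (out : List Int) : Prop := out = h_matrix_to_lables_alt h_mat
instance (h_mat : List (List Int)) (out : List Int) : Decidable (Spec_h_matrix_to_lables h_mat out) := by unfold Spec_h_matrix_to_lables; infer_instance

-- ===== CLAIM (what is proved, stated in full; the proofs are below) =====
def Claim_equal_h_matrix_to_lables : Prop := ∀ (h_mat : List (List Int)), Dom_h_matrix_to_lables h_mat → Spec_h_matrix_to_lables h_mat (h_matrix_to_lables h_mat)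

-- ===== LEMMAS AND PROOFS =====

theorem pv_foldl_max_max (t : List Int) : ∀ (a b : Int), t.foldl max (max a b) = max a (t.foldl max b) := by
  induction t with
  | nil => intro a b; simp [List.foldl]
  | cons x t ih =>
      intro a b
      simp only [List.foldl]
      rw [max_assoc, ih]

theorem pv_le_foldl_max (t : List Int) : ∀ (b : Int), b ≤ t.foldl max b := by
  induction t with
  | nil => intro b; simp [List.foldl]
  | cons x t ih =>
      intro b
      simp only [List.foldl]
      exact le_trans (le_max_left b x) (ih _)

theorem pvAInner_spec (t : List Int) : ∀ (j : Nat) (mv mi : Int),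
    pvAInner t j (mv, mi) =
      if t.foldl max mv > mv then
        (t.foldl max mv, ((j + t.idxOf (t.foldl max mv) : Nat) : Int))
      else (mv, mi) := by
  induction t with
  | nil => intro j mv mi; simp [pvAInner]
  | cons x t ih =>
      intro j mv mi
      simp only [pvAInner, List.foldl_cons]
      by_cases hx : x > mv
      · rw [if_pos hx, ih]
        have hm : max mv x = x := max_eq_right (le_of_lt hx)
        rw [hm]
        by_cases ht : t.foldl max x > x
        · rw [if_pos ht]
          have hmv : t.foldl max x > mv := lt_trans hx ht
          have hne : x ≠ t.foldl max x := (ne_of_gt ht).symm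
          rw [if_pos hmv]
          refine Prod.ext rfl ?_
          have hidx : (x :: t).idxOf (t.foldl max x) = t.idxOf (t.foldl max x) + 1 := by
            simp [List.idxOf_cons, hne]
          rw [hidx]; push_cast; ring
        · rw [if_neg ht]
          have hx' : t.foldl max x = x := le_antisymm (not_lt.mp ht) (pv_le_foldl_max t x)
          rw [hx', if_pos hx]
          simp [List.idxOf_cons]
      · rw [if_neg hx, ih]
        have hm : max mv x = mv := max_eq_left (not_lt.mp hx)
        rw [hm]
        by_cases ht : t.foldl max mv > mv
        · rw [if_pos ht, if_pos ht]
          have hne : x ≠ t.foldl max mv := (ne_of_gt (lt_of_le_of_lt (not_lt.mp hx) ht)).symm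
          refine Prod.ext rfl ?_
          have hidx : (x :: t).idxOf (t.foldl max mv) = t.idxOf (t.foldl max mv) + 1 := by
            simp [List.idxOf_cons, hne]
          rw [hidx]; push_cast; ring
        · rw [if_neg ht, if_neg ht]

theorem pv_idxOf?_of_mem (m : Int) : ∀ (l : List Int), m ∈ l → List.idxOf? m l = some (List.idxOf m l) := by
  intro l
  induction l with
  | nil => intro h; cases h
  | cons x t ih =>
      intro hmem
      by_cases hx : x = m
      · subst hx
        simp [List.idxOf?_cons, List.idxOf_cons]
      · have hm : m ∈ t := by
          cases hmem with
          | head => exact absurd rfl hx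
          | tail _ h => exact h
        have hbe : (x == m) = false := beq_eq_false_iff_ne.mpr hx
        simp [List.idxOf?_cons, List.idxOf_cons, hbe, ih hm]

theorem pv_row_eq (row : List Int) : (pvAInner row 0 (-1, -1)).2 = pvRowLabel row := by
  cases row with
  | nil => simp [pvAInner, pvRowLabel, PySem.List.max?]
  | cons x t =>
      rw [pvAInner_spec]
      unfold pvRowLabel
      rw [PySem.List.max?_id_cons]
      have hmem : t.foldl max x ∈ x :: t :=
        PySem.List.max?_mem (by rw [PySem.List.max?_id_cons])
      have hfold : (x :: t).foldl max (-1) = max (-1) (t.foldl max x) := by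
        rw [List.foldl_cons]; exact pv_foldl_max_max t (-1) x
      rw [hfold]
      by_cases hm : t.foldl max x > -1
      · have h1 : max (-1 : Int) (t.foldl max x) = t.foldl max x := max_eq_right (le_of_lt hm)
        rw [h1, if_pos hm]
        have hidx : PySem.List.index? (x :: t) (t.foldl max x)
            = some (List.idxOf (t.foldl max x) (x :: t)) := by
          rw [PySem.List.index?_eq_idxOf?]
          exact pv_idxOf?_of_mem _ _ hmem
        simp only [hm, if_pos hm, hidx, Option.getD_some]
        rw [PySem.List.index?_eq_idxOf?] at hidx
        simp [hidx]
      · have h1 : max (-1 : Int) (t.foldl max x) = -1 := max_eq_left (not_lt.mp hm)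
        rw [h1]
        simp [hm]

-- ===== VERDICT (by name: the statement is the Claim_ definition above) =====
theorem h_matrix_to_lables_spec : Claim_equal_h_matrix_to_lables := by
  intro h_mat _
  unfold Spec_h_matrix_to_lables h_matrix_to_lables h_matrix_to_lables_alt
  exact List.map_congr_left (fun row _ => pv_row_eq row)
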